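-- pv_equiv track=rewrite | github.com/K-atc/vega-solver | vega/smtlib/vega/helper.py | split_script_to_lines
-- ===== SOURCE A (Python) =====
-- def split_script_to_lines(raw_script):
--     bracket_depth = 0
--     lines = []
--     line = ""
--     comment_line = False
--     for c in raw_script:
--         if c == ';':
--             comment_line = True
--         elif c == '\r':
--             pass
--         elif c == '\n':
--             line += ' '
--             if comment_line:
--                 comment_line = False
--                 line = ""
--         elif not comment_line:
--             line += c
--             if c == '(':
--                 bracket_depth += 1
--             elif c == ')':
--                 bracket_depth -= 1
--                 if bracket_depth == 0:
--                     lines.append(line)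
--                     line = ""
--     return lines
-- ===== SOURCE B (Python) =====
-- def split_script_to_lines(raw_script):
--     lines = []
--     buf = ""
--     depth = 0
--     for phys in raw_script.split('\n'):
--         parts = phys.split(';')
--         for c in parts[0].replace('\r', ''):
--             buf += c
--             if c == '(':
--                 depth += 1
--             elif c == ')':
--                 depth -= 1
--                 if depth == 0:
--                     lines.append(buf)
--                     buf = ""
--         buf += ' '
--         if len(parts) > 1:
--             buf = ""
--     return lines
-- ===== Notes on version B (the rewrite author's own statement) =====
-- stated objective: idiomatic
-- what changed: A scans the script one character at a time with a comment_line flag woven through a four-field state machine; B first splits the script into physical lines, reduces each line to its content (the part before the first ';', with '\r' removed), and runs the bracket-depth scan over that content, carrying only (depth, lines, buffer) across lines. The line/comment stripping is done by C-level str.split/replace instead of per-character Python branching.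
import Mathlib
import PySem

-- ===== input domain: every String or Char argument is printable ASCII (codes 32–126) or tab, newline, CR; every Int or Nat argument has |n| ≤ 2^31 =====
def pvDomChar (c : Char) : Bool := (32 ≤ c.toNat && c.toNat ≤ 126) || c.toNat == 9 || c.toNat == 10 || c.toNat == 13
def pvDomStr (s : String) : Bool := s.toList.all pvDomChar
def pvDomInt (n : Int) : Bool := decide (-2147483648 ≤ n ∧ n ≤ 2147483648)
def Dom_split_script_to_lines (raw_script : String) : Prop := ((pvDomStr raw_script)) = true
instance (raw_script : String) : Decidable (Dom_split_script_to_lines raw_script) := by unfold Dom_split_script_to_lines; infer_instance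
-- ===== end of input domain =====

-- B replaces A's single char-by-char state machine by a line-based decomposition:
-- split on '\n', take each line's part before the first ';' with '\r' removed, and
-- run the bracket-depth scan per line (objective: idiomatic; same cost).


-- ===== PORT A =====
-- state: (bracket_depth, lines, line, comment_line)
def pvAStep : (Int × List (List Char) × List Char × Bool) → Char → (Int × List (List Char) × List Char × Bool)
  | (d, ls, line, comment), c =>
    if c = ';' then (d, ls, line, true)
    else if c = '\r' then (d, ls, line, comment)
    else if c = '\n' then
      let line' := line ++ [' ']
      if comment then (d, ls, [], false) else (d, ls, line', false)
    else if comment then (d, ls, line, comment)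
    else
      let line' := line ++ [c]
      if c = '(' then (d + 1, ls, line', comment)
      else if c = ')' then
        let d' := d - 1
        if d' = 0 then (d', ls ++ [line'], [], comment) else (d', ls, line', comment)
      else (d, ls, line', comment)

def split_script_to_lines (raw_script : String) : List String :=
  ((raw_script.toList.foldl pvAStep (0, [], [], false)).2.1).map String.ofList

-- ===== PORT B =====
-- inner loop of Source B: one content character, state (depth, lines, buf)
def pvBChar : (Int × List (List Char) × List Char) → Char → (Int × List (List Char) × List Char)
  | (d, ls, buf), c =>
    let buf' := buf ++ [c]
    if c = '(' then (d + 1, ls, buf')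
    else if c = ')' then
      let d' := d - 1
      if d' = 0 then (d', ls ++ [buf'], []) else (d', ls, buf')
    else (d, ls, buf')

-- outer loop body of Source B: one physical line
def pvBLine (st : Int × List (List Char) × List Char) (phys : List Char) :
    Int × List (List Char) × List Char :=
  let parts := PySem.Chars.splitOn phys [';']
  let st' := (PySem.Chars.replace (parts.headD []) ['\r'] []).foldl pvBChar st
  let buf' := st'.2.2 ++ [' ']
  if parts.length > 1 then (st'.1, st'.2.1, []) else (st'.1, st'.2.1, buf')

def split_script_to_lines_alt (raw_script : String) : List String :=
  (((PySem.Chars.splitOn raw_script.toList ['\n']).foldl pvBLine (0, [], [])).2.1).map String.ofList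

-- ===== PRECONDITION & SPEC =====
def Spec_split_script_to_lines (raw_script : String) (out : List String) : Prop := out = split_script_to_lines_alt raw_script
instance (raw_script : String) (out : List String) : Decidable (Spec_split_script_to_lines raw_script out) := by unfold Spec_split_script_to_lines; infer_instance

-- ===== CLAIM (what is proved, stated in full; the proofs are below) =====
def Claim_equal_split_script_to_lines : Prop := ∀ (raw_script : String), Dom_split_script_to_lines raw_script → Spec_split_script_to_lines raw_script (split_script_to_lines raw_script)

-- ===== LEMMAS AND PROOFS =====

-- proof-side model of splitting a char list on a one-char separator: (first piece, later pieces)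
def splitC (d : Char) : List Char → List Char × List (List Char)
  | [] => ([], [])
  | c :: t => let p := splitC d t; if c = d then ([], p.1 :: p.2) else (c :: p.1, p.2)

theorem go_single (d : Char) (l : List Char) : ∀ (fuel : Nat) (cur : List Char) (acc : List (List Char)), l.length ≤ fuel →
    PySem.Chars.splitOn.go [d] fuel l cur acc = acc.reverse ++ (cur.reverse ++ (splitC d l).1) :: (splitC d l).2 := by
  induction l with
  | nil => intro fuel cur acc h
           cases fuel <;> simp [PySem.Chars.splitOn.go, splitC]
  | cons c t ih =>
    intro fuel cur acc h
    cases fuel with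
    | zero => simp at h
    | succ f =>
      simp only [PySem.Chars.splitOn.go]
      by_cases hc : c = d
      · subst hc
        simp [List.isPrefixOf, splitC, ih f [] ((cur.reverse) :: acc) (by simpa using h)]
      · simp [List.isPrefixOf, hc, splitC, Ne.symm hc, ih f (c :: cur) acc (by simpa using h)]

theorem splitOn_single (d : Char) (l : List Char) :
    PySem.Chars.splitOn l [d] = (splitC d l).1 :: (splitC d l).2 := by
  rw [PySem.Chars.splitOn.eq_1]
  simpa using go_single d l (l.length + 1) [] [] (by omega)

theorem replace_go_filter (l : List Char) : ∀ (fuel : Nat) (acc : List Char), l.length ≤ fuel →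
    PySem.Chars.replace.go ['\r'] [] fuel l acc = acc.reverse ++ l.filter (· ≠ '\r') := by
  induction l with
  | nil => intro fuel acc h; cases fuel <;> simp [PySem.Chars.replace.go]
  | cons c t ih =>
    intro fuel acc h
    cases fuel with
    | zero => simp at h
    | succ f =>
      simp only [PySem.Chars.replace.go]
      by_cases hc : c = '\r'
      · subst hc; simp [List.isPrefixOf, ih f acc (by simpa using h)]
      · simp [List.isPrefixOf, hc, Ne.symm hc, ih f (c :: acc) (by simpa using h)]

theorem replace_cr (l : List Char) :
    PySem.Chars.replace l ['\r'] [] = l.filter (· ≠ '\r') := by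
  rw [PySem.Chars.replace]
  simpa using replace_go_filter l l.length [] le_rfl

theorem splitC_of_not_mem {d : Char} {l : List Char} (h : d ∉ l) : splitC d l = (l, []) := by
  induction l with
  | nil => simp [splitC]
  | cons c t ih =>
    simp at h
    simp [splitC, ih h.2, Ne.symm h.1]

theorem splitC_append {d : Char} {pre : List Char} (post : List Char) (h : d ∉ pre) :
    splitC d (pre ++ d :: post) = (pre, (splitC d post).1 :: (splitC d post).2) := by
  induction pre with
  | nil => simp [splitC]
  | cons c t ih =>
    simp at h
    simp [splitC, ih h.2, Ne.symm h.1]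

-- once comment_line is set, A ignores everything up to the next '\n'
theorem comment_skip {t : List Char} (h : ('\n' : Char) ∉ t) (d : Int) (ls : List (List Char)) (buf : List Char) :
    t.foldl pvAStep (d, ls, buf, true) = (d, ls, buf, true) := by
  induction t with
  | nil => rfl
  | cons c r ih =>
    simp at h
    by_cases hc : c = ';'
    · subst hc; simpa [pvAStep] using ih h.2
    · by_cases hr : c = '\r'
      · subst hr; simpa [pvAStep] using ih h.2
      · simpa [pvAStep, hc, hr, Ne.symm h.1] using ih h.2

-- A over one newline-free segment = B's inner loop over that segment's content
theorem seg_fold {seg : List Char} (h : ('\n' : Char) ∉ seg) : ∀ (d : Int) (ls : List (List Char)) (buf : List Char),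
    seg.foldl pvAStep (d, ls, buf, false)
      = (let t := (((splitC ';' seg).1).filter (· ≠ '\r')).foldl pvBChar (d, ls, buf)
         (t.1, t.2.1, t.2.2, !(splitC ';' seg).2.isEmpty)) := by
  induction seg with
  | nil => intro d ls buf; simp [splitC]
  | cons c r ih =>
    intro d ls buf
    simp at h
    by_cases hc : c = ';'
    · subst hc
      simp [pvAStep, splitC, comment_skip h.2]
    · by_cases hr : c = '\r'
      · subst hr
        simpa [pvAStep, splitC, List.filter_cons] using ih h.2 d ls buf
      · by_cases hp : c = '('
        · subst hp
          simpa [pvAStep, splitC, List.filter_cons, pvBChar] using ih h.2 (d + 1) ls (buf ++ ['('])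
        · by_cases hq : c = ')'
          · subst hq
            by_cases hd : d - 1 = 0
            · simpa [pvAStep, splitC, List.filter_cons, pvBChar, hd, Ne.symm h.1] using
                ih h.2 (d - 1) (ls ++ [buf ++ [')']]) []
            · simpa [pvAStep, splitC, List.filter_cons, pvBChar, hd, Ne.symm h.1] using
                ih h.2 (d - 1) ls (buf ++ [')'])
          · simpa [pvAStep, splitC, List.filter_cons, pvBChar, hc, hr, hp, hq, Ne.symm h.1] using
              ih h.2 d ls (buf ++ [c])

-- pvBLine rewritten through the proof-side split/filter
def pvBLineC (st : Int × List (List Char) × List Char) (phys : List Char) :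
    Int × List (List Char) × List Char :=
  let t := (((splitC ';' phys).1).filter (· ≠ '\r')).foldl pvBChar st
  if (splitC ';' phys).2.isEmpty then (t.1, t.2.1, t.2.2 ++ [' ']) else (t.1, t.2.1, [])

theorem pvBLine_eq (st : Int × List (List Char) × List Char) (phys : List Char) :
    pvBLine st phys = pvBLineC st phys := by
  unfold pvBLine pvBLineC
  rw [splitOn_single]
  simp only [List.headD_cons, replace_cr, List.length_cons]
  rcases h : (splitC ';' phys).2 with _ | ⟨p, ps⟩ <;> simp

-- splitting a string with '\n' ∈ it at its first '\n'
theorem decomp (cs : List Char) (hmem : ('\n' : Char) ∈ cs) :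
    cs = cs.takeWhile (· ≠ '\n') ++ '\n' :: (cs.dropWhile (· ≠ '\n')).tail := by
  have hne : cs.dropWhile (fun c => c ≠ '\n') ≠ [] := by
    intro h0
    have h1 := List.takeWhile_append_dropWhile (p := fun c => (c ≠ '\n' : Bool)) (l := cs)
    rw [h0, List.append_nil] at h1
    have := List.mem_takeWhile_imp (h1 ▸ hmem)
    simp at this
  have hhead := List.head_dropWhile_not (p := fun c => (c ≠ '\n' : Bool)) (l := cs) hne
  conv_lhs => rw [← List.takeWhile_append_dropWhile (p := fun c => (c ≠ '\n' : Bool)) (l := cs)]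
  congr 1
  cases hd : cs.dropWhile (fun c => c ≠ '\n') with
  | nil => exact absurd hd hne
  | cons a t =>
    have ha : a = '\n' := by
      simp only [hd] at hhead
      simpa using hhead
    simp [ha]

-- main induction: A's fold over the raw characters vs B's fold over the physical lines,
-- compared on the depth and lines components (the trailing buffer may differ)
theorem top_fold : ∀ (n : Nat) (cs : List Char), cs.length = n → ∀ (d : Int) (ls : List (List Char)) (buf : List Char),
    (cs.foldl pvAStep (d, ls, buf, false)).1
        = (((splitC '\n' cs).1 :: (splitC '\n' cs).2).foldl pvBLineC (d, ls, buf)).1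
      ∧ (cs.foldl pvAStep (d, ls, buf, false)).2.1
        = (((splitC '\n' cs).1 :: (splitC '\n' cs).2).foldl pvBLineC (d, ls, buf)).2.1 := by
  intro n
  induction n using Nat.strong_induction_on with
  | _ n ih =>
    intro cs hn d ls buf
    by_cases hmem : ('\n' : Char) ∈ cs
    · set pre := cs.takeWhile (· ≠ '\n') with hpre_def
      set rest := (cs.dropWhile (· ≠ '\n')).tail with hrest_def
      have hsplit : cs = pre ++ '\n' :: rest := decomp cs hmem
      have hpre : ('\n' : Char) ∉ pre := by
        intro hx
        have := List.mem_takeWhile_imp (hpre_def ▸ hx)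
        simp at this
      have hlen : rest.length < n := by
        rw [hsplit] at hn
        simp at hn
        omega
      rw [hsplit, splitC_append rest hpre]
      rw [List.foldl_append, List.foldl_cons, seg_fold hpre d ls buf]
      simp only [List.foldl_cons (f := pvBLineC)]
      have hline : pvBLineC (d, ls, buf) pre
          = (let t := (((splitC ';' pre).1).filter (· ≠ '\r')).foldl pvBChar (d, ls, buf)
             if (splitC ';' pre).2.isEmpty then (t.1, t.2.1, t.2.2 ++ [' ']) else (t.1, t.2.1, [])) := rfl
      rcases hcom : (splitC ';' pre).2.isEmpty with _ | _
      · -- comment on this line: A resets the buffer at the '\n'; B resets after the line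
        simpa [pvAStep, hline, hcom] using
          ih rest.length hlen rest rfl
            ((((splitC ';' pre).1.filter (· ≠ '\r')).foldl pvBChar (d, ls, buf)).1)
            ((((splitC ';' pre).1.filter (· ≠ '\r')).foldl pvBChar (d, ls, buf)).2.1)
            []
      · simpa [pvAStep, hline, hcom] using
          ih rest.length hlen rest rfl
            ((((splitC ';' pre).1.filter (· ≠ '\r')).foldl pvBChar (d, ls, buf)).1)
            ((((splitC ';' pre).1.filter (· ≠ '\r')).foldl pvBChar (d, ls, buf)).2.1)
            (((((splitC ';' pre).1.filter (· ≠ '\r')).foldl pvBChar (d, ls, buf)).2.2) ++ [' '])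
    · rw [splitC_of_not_mem hmem]
      rw [seg_fold hmem d ls buf]
      simp only [List.foldl_cons, List.foldl_nil, pvBLineC]
      rcases h : (splitC ';' cs).2.isEmpty <;> simp

-- ===== VERDICT (by name: the statement is the Claim_ definition above) =====
theorem split_script_to_lines_spec : Claim_equal_split_script_to_lines := by
  intro raw _
  unfold Spec_split_script_to_lines split_script_to_lines split_script_to_lines_alt
  rw [splitOn_single]
  have hcongr : ∀ (l : List (List Char)) (st : Int × List (List Char) × List Char),
      List.foldl pvBLine st l = List.foldl pvBLineC st l :=
    fun l st => PySem.List.foldl_congr_mem l pvBLine pvBLineC st (fun acc x _ => pvBLine_eq acc x)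
  rw [hcongr]
  exact congrArg (List.map String.ofList) (top_fold raw.toList.length raw.toList rfl 0 [] []).2
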